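-- pv_equiv track=rewrite | github.com/ajhsoftware/KeyquorumVault | src/main/python/security/preflight.py | _overall_from_providers
-- ===== SOURCE A (Python) =====
-- def _overall_from_providers(providers):
--     any_enabled = any(p.get('state') == 'Enabled' for p in providers)
--     any_snoozed = any(p.get('state') == 'Snoozed' for p in providers)
--     any_expired = any(p.get('state') == 'Expired' for p in providers)
--     any_disabled = any(p.get('state') == 'Disabled' for p in providers)
--     if any_enabled and not (any_snoozed or any_expired):
--         return "Good"
--     if any_snoozed:
--         return "Snoozed"
--     if any_expired or any_disabled:
--         return "Poor"
--     return "Unknown"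
-- ===== SOURCE B (Python) =====
-- def _overall_from_providers(providers):
--     rank = {'Snoozed': 4, 'Expired': 3, 'Enabled': 2, 'Disabled': 1}
--     best = 0
--     for p in providers:
--         r = rank.get(p.get('state'), 0)
--         if r > best:
--             best = r
--     return ('Unknown', 'Poor', 'Good', 'Poor', 'Snoozed')[best]
-- ===== Notes on version B (the rewrite author's own statement) =====
-- stated objective: alternative
-- what changed: B replaces A's four any() scans and boolean cascade by a single pass that keeps the maximum numeric severity (Snoozed=4, Expired=3, Enabled=2, Disabled=1, other=0) and indexes a fixed result table with it; correct because the cascade's priority order is exactly that severity ordering.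
import Mathlib
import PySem

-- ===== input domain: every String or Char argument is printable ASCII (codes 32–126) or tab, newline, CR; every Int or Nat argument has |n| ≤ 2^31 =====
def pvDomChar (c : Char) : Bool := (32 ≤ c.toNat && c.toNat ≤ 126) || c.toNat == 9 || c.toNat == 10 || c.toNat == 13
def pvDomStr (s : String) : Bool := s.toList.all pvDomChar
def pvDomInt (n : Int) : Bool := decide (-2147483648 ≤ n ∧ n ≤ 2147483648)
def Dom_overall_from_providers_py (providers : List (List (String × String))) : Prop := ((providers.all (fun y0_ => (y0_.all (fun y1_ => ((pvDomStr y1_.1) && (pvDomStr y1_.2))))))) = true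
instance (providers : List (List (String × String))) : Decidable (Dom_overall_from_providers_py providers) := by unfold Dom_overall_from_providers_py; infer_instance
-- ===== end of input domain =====

-- B replaces A's four any() scans and boolean cascade by one max-severity pass plus a result table (alternative algorithm, same cost class).

-- ===== PORT A =====
def overall_from_providers_py (providers : List (List (String × String))) : String :=
  let any_enabled := providers.any (fun p => PySem.Dict.get? (PySem.Dict.mk p) "state" == some "Enabled")
  let any_snoozed := providers.any (fun p => PySem.Dict.get? (PySem.Dict.mk p) "state" == some "Snoozed")
  let any_expired := providers.any (fun p => PySem.Dict.get? (PySem.Dict.mk p) "state" == some "Expired")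
  let any_disabled := providers.any (fun p => PySem.Dict.get? (PySem.Dict.mk p) "state" == some "Disabled")
  if any_enabled && !(any_snoozed || any_expired) then "Good"
  else if any_snoozed then "Snoozed"
  else if any_expired || any_disabled then "Poor"
  else "Unknown"

-- ===== PORT B =====
-- B: one pass keeping the maximum severity rank, then a table lookup (index is always 0..4, so getD's default is never used)
def overall_from_providers_py_alt (providers : List (List (String × String))) : String :=
  let rank : PySem.Dict String Nat :=
    PySem.Dict.mk [("Snoozed", 4), ("Expired", 3), ("Enabled", 2), ("Disabled", 1)]
  let best := providers.foldl (fun best p =>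
    let r := match PySem.Dict.get? (PySem.Dict.mk p) "state" with
             | some s => PySem.Dict.getD rank s 0
             | none => 0
    if r > best then r else best) 0
  (["Unknown", "Poor", "Good", "Poor", "Snoozed"]).getD best ""

-- ===== PRECONDITION & SPEC =====
def Spec_overall_from_providers_py (providers : List (List (String × String))) (out : String) : Prop := out = overall_from_providers_py_alt providers
instance (providers : List (List (String × String))) (out : String) : Decidable (Spec_overall_from_providers_py providers out) := by unfold Spec_overall_from_providers_py; infer_instance

-- ===== CLAIM (what is proved, stated in full; the proofs are below) =====
def Claim_equal_overall_from_providers_py : Prop := ∀ (providers : List (List (String × String))), Dom_overall_from_providers_py providers → Spec_overall_from_providers_py providers (overall_from_providers_py providers)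

-- ===== LEMMAS AND PROOFS =====

-- the per-provider severity rank, as B's loop body computes it
def pvRank (p : List (String × String)) : Nat :=
  match PySem.Dict.get? (PySem.Dict.mk p) "state" with
  | some s => PySem.Dict.getD (PySem.Dict.mk [("Snoozed", 4), ("Expired", 3), ("Enabled", 2), ("Disabled", 1)]) s 0
  | none => 0

-- the cascade value A's booleans would choose, as a number
def pvChain (l : List (List (String × String))) : Nat :=
  if l.any (fun p => PySem.Dict.get? (PySem.Dict.mk p) "state" == some "Snoozed") then 4
  else if l.any (fun p => PySem.Dict.get? (PySem.Dict.mk p) "state" == some "Expired") then 3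
  else if l.any (fun p => PySem.Dict.get? (PySem.Dict.mk p) "state" == some "Enabled") then 2
  else if l.any (fun p => PySem.Dict.get? (PySem.Dict.mk p) "state" == some "Disabled") then 1
  else 0

theorem pvRank_cases (p : List (String × String)) :
    (pvRank p = 4 ∧ PySem.Dict.get? (PySem.Dict.mk p) "state" = some "Snoozed")
  ∨ (pvRank p = 3 ∧ PySem.Dict.get? (PySem.Dict.mk p) "state" = some "Expired")
  ∨ (pvRank p = 2 ∧ PySem.Dict.get? (PySem.Dict.mk p) "state" = some "Enabled")
  ∨ (pvRank p = 1 ∧ PySem.Dict.get? (PySem.Dict.mk p) "state" = some "Disabled")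
  ∨ (pvRank p = 0 ∧ PySem.Dict.get? (PySem.Dict.mk p) "state" ≠ some "Snoozed"
       ∧ PySem.Dict.get? (PySem.Dict.mk p) "state" ≠ some "Expired"
       ∧ PySem.Dict.get? (PySem.Dict.mk p) "state" ≠ some "Enabled"
       ∧ PySem.Dict.get? (PySem.Dict.mk p) "state" ≠ some "Disabled") := by
  unfold pvRank
  cases h : PySem.Dict.get? (PySem.Dict.mk p) "state" with
  | none => simp
  | some s =>
    by_cases h1 : s = "Snoozed"
    · subst h1; left; exact ⟨by decide, rfl⟩
    by_cases h2 : s = "Expired"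
    · subst h2; right; left; exact ⟨by decide, rfl⟩
    by_cases h3 : s = "Enabled"
    · subst h3; right; right; left; exact ⟨by decide, rfl⟩
    by_cases h4 : s = "Disabled"
    · subst h4; right; right; right; left; exact ⟨by decide, rfl⟩
    · right; right; right; right
      refine ⟨?_, by simp [h1], by simp [h2], by simp [h3], by simp [h4]⟩
      simp [PySem.Dict.getD, PySem.Dict.get?, List.find?,
        beq_eq_false_iff_ne.mpr (Ne.symm h1), beq_eq_false_iff_ne.mpr (Ne.symm h2),
        beq_eq_false_iff_ne.mpr (Ne.symm h3), beq_eq_false_iff_ne.mpr (Ne.symm h4)]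

-- B's foldl, started from any accumulator, is the max of that accumulator and the 0-started fold
theorem pvFold_acc (l : List (List (String × String))) (a : Nat) :
    l.foldl (fun best p => if pvRank p > best then pvRank p else best) a
      = max a (l.foldl (fun best p => if pvRank p > best then pvRank p else best) 0) := by
  induction l generalizing a with
  | nil => simp
  | cons p l ih =>
    simp only [List.foldl_cons]
    rw [ih, ih (if pvRank p > 0 then pvRank p else 0)]
    by_cases h1 : pvRank p > a <;> by_cases h2 : pvRank p > 0 <;> simp [h1, h2] <;> omega

-- B's 0-started fold computes exactly the cascade value
theorem pvFold_eq_chain (l : List (List (String × String))) :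
    l.foldl (fun best p => if pvRank p > best then pvRank p else best) 0 = pvChain l := by
  induction l with
  | nil => simp [pvChain]
  | cons p l ih =>
    simp only [List.foldl_cons]
    rw [pvFold_acc, ih]
    rcases pvRank_cases p with ⟨hr, hs⟩ | ⟨hr, hs⟩ | ⟨hr, hs⟩ | ⟨hr, hs⟩ | ⟨hr, h1, h2, h3, h4⟩ <;>
      simp only [pvChain, List.any_cons, hr] <;>
      [simp [hs]; simp [hs]; simp [hs]; simp [hs];
       simp [beq_eq_false_iff_ne.mpr h1, beq_eq_false_iff_ne.mpr h2,
             beq_eq_false_iff_ne.mpr h3, beq_eq_false_iff_ne.mpr h4]] <;>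
      split_ifs <;> omega

-- ===== VERDICT (by name: the statement is the Claim_ definition above) =====
theorem overall_from_providers_py_spec : Claim_equal_overall_from_providers_py := by
  intro providers _
  unfold Spec_overall_from_providers_py overall_from_providers_py overall_from_providers_py_alt
  have hB : providers.foldl (fun best p =>
      let r := match PySem.Dict.get? (PySem.Dict.mk p) "state" with
               | some s => PySem.Dict.getD (PySem.Dict.mk [("Snoozed", 4), ("Expired", 3), ("Enabled", 2), ("Disabled", 1)]) s 0
               | none => 0
      if r > best then r else best) 0 = pvChain providers := by
    have : (fun (best : Nat) (p : List (String × String)) =>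
        let r := match PySem.Dict.get? (PySem.Dict.mk p) "state" with
                 | some s => PySem.Dict.getD (PySem.Dict.mk [("Snoozed", 4), ("Expired", 3), ("Enabled", 2), ("Disabled", 1)]) s 0
                 | none => 0
        if r > best then r else best)
        = (fun best p => if pvRank p > best then pvRank p else best) := by
      funext best p; simp [pvRank]
    rw [this, pvFold_eq_chain]
  simp only [hB]
  unfold pvChain
  by_cases hS : providers.any (fun p => PySem.Dict.get? (PySem.Dict.mk p) "state" == some "Snoozed") = true <;>
  by_cases hE : providers.any (fun p => PySem.Dict.get? (PySem.Dict.mk p) "state" == some "Expired") = true <;>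
  by_cases hEn : providers.any (fun p => PySem.Dict.get? (PySem.Dict.mk p) "state" == some "Enabled") = true <;>
  by_cases hD : providers.any (fun p => PySem.Dict.get? (PySem.Dict.mk p) "state" == some "Disabled") = true <;>
    simp [hS, hE, hEn, hD]
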